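-- pv_equiv track=rewrite | github.com/sohye-lee/algorithm_study | strings/1316.py | word_check
-- ===== SOURCE A (Python) =====
-- def word_check(letters):
--     abc = list(range(65,91))
--     abc = list(map(chr, abc))
--     for letter in letters:
--         if letter not in abc:
--             return False
--         else:
--             abc.remove(letter)
--     return True
-- ===== SOURCE B (Python) =====
-- def word_check(letters):
--     abc = set(map(chr, range(65, 91)))
--     return all(c in abc for c in letters) and len(set(letters)) == len(letters)
-- ===== Notes on version B (the rewrite author's own statement) =====
-- stated objective: idiomatic
-- what changed: Replaces the stateful shrinking-list pass with list.remove by two independent declarative checks: membership of every element in a fixed set plus a set-cardinality comparison for uniqueness.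
import Mathlib
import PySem

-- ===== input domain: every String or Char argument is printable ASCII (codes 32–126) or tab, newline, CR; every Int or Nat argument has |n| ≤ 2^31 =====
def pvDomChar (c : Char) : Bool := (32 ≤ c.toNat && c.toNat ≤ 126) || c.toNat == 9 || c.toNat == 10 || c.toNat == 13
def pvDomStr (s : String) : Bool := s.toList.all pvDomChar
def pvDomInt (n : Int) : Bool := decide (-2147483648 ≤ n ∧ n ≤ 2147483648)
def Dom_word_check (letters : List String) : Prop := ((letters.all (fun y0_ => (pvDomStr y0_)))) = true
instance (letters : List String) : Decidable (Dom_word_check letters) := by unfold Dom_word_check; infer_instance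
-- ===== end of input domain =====

-- B replaces A's stateful shrinking-list pass (list.remove) by two independent checks:
-- membership in a fixed set and a set-cardinality comparison for uniqueness (idiomatic).

-- chr(n): exact for 65 ≤ n < 91 (the only values either Python passes)
def pyChr (n : Int) : String := String.ofList [Char.ofNat n.toNat]

-- ===== PORT A =====
def word_check_go (abc : List String) (letters : List String) : Bool :=
  match letters with
  | [] => true
  | letter :: rest =>
    if letter ∈ abc then
      match PySem.List.remove? abc letter with
      | some abc' => word_check_go abc' rest
      | none => false   -- unreachable: letter ∈ abc
    else false

def word_check (letters : List String) : Bool :=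
  word_check_go ((PySem.List.pyRange 65 91 1).map pyChr) letters

-- ===== PORT B =====
def word_check_alt (letters : List String) : Bool :=
  let abc : PySem.Set String := PySem.Set.ofList ((PySem.List.pyRange 65 91 1).map pyChr)
  (letters.all (fun c => PySem.Set.contains abc c)) &&
    (PySem.Set.len (PySem.Set.ofList letters) == (letters.length : Int))

-- ===== PRECONDITION & SPEC =====
def Spec_word_check (letters : List String) (out : Bool) : Prop := out = word_check_alt letters
instance (letters : List String) (out : Bool) : Decidable (Spec_word_check letters out) := by unfold Spec_word_check; infer_instance

-- ===== CLAIM (what is proved, stated in full; the proofs are below) =====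
def Claim_equal_word_check : Prop := ∀ (letters : List String), Dom_word_check letters → Spec_word_check letters (word_check letters)

-- ===== LEMMAS AND PROOFS =====

lemma ofList_sublist {α : Type} [BEq α] [LawfulBEq α] (xs : List α) :
    (PySem.Set.ofList xs).Sublist xs := by
  induction xs using List.reverseRecOn with
  | nil => simp [PySem.Set.ofList_nil]
  | append_singleton ys y ih =>
    rw [PySem.Set.ofList_append_singleton]
    by_cases h : y ∈ ys
    · rw [show PySem.Set.add (PySem.Set.ofList ys) y = PySem.Set.ofList ys from by
        simp [PySem.Set.add, h]]
      exact ih.trans (List.sublist_append_left ys [y])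
    · rw [show PySem.Set.add (PySem.Set.ofList ys) y = PySem.Set.ofList ys ++ [y] from by
        simp [PySem.Set.add, h]]
      exact ih.append (List.Sublist.refl [y])

lemma ofList_length_eq_iff {α : Type} [BEq α] [LawfulBEq α] (xs : List α) :
    (PySem.Set.ofList xs).length = xs.length ↔ xs.Nodup := by
  constructor
  · intro h
    have := (ofList_sublist xs).eq_of_length h
    rw [← this]; exact PySem.Set.nodup_ofList xs
  · intro h
    rw [PySem.Set.ofList_eq_self_of_nodup xs h]

lemma go_iff (letters : List String) :
    ∀ abc : List String, abc.Nodup →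
      (word_check_go abc letters = true ↔ (∀ c ∈ letters, c ∈ abc) ∧ letters.Nodup) := by
  induction letters with
  | nil => intro abc _; simp [word_check_go]
  | cons l rest ih =>
    intro abc habc
    simp only [List.forall_mem_cons, List.nodup_cons]
    by_cases hmem : l ∈ abc
    · rw [word_check_go, if_pos hmem, PySem.List.remove?_eq_some_erase abc l hmem]
      have herase : (abc.erase l).Nodup := habc.erase l
      rw [ih (abc.erase l) herase]
      constructor
      · rintro ⟨hall, hnd⟩
        exact ⟨⟨hmem, fun c hc => ((habc.mem_erase_iff).mp (hall c hc)).2⟩,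
          fun hl => ((habc.mem_erase_iff).mp (hall l hl)).1 rfl, hnd⟩
      · rintro ⟨⟨-, hall⟩, hnotin, hnd⟩
        exact ⟨fun c hc => (habc.mem_erase_iff).mpr ⟨fun h => hnotin (h ▸ hc), hall c hc⟩, hnd⟩
    · rw [word_check_go, if_neg hmem]
      simp only [Bool.false_eq_true, false_iff]
      rintro ⟨⟨hl, -⟩, -⟩
      exact hmem hl

lemma abc_nodup : ((PySem.List.pyRange 65 91 1).map pyChr).Nodup := by decide

lemma alt_iff (letters : List String) :
    word_check_alt letters = true ↔
      (∀ c ∈ letters, c ∈ (PySem.List.pyRange 65 91 1).map pyChr) ∧ letters.Nodup := by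
  unfold word_check_alt
  simp only [Bool.and_eq_true, List.all_eq_true, PySem.Set.contains_iff, PySem.Set.mem_ofList,
    beq_iff_eq, PySem.Set.len]
  constructor
  · rintro ⟨h1, h2⟩
    refine ⟨h1, (ofList_length_eq_iff letters).mp ?_⟩
    exact_mod_cast h2
  · rintro ⟨h1, h2⟩
    refine ⟨h1, ?_⟩
    exact_mod_cast (ofList_length_eq_iff letters).mpr h2

-- ===== VERDICT (by name: the statement is the Claim_ definition above) =====
theorem word_check_spec : Claim_equal_word_check := by
  intro letters _
  unfold Spec_word_check word_check
  have hA := go_iff letters _ abc_nodup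
  have hB := alt_iff letters
  cases hgo : word_check_go ((PySem.List.pyRange 65 91 1).map pyChr) letters with
  | true => exact (hB.mpr (hA.mp hgo)).symm
  | false =>
    cases halt : word_check_alt letters with
    | true => exact absurd (hA.mpr (hB.mp halt)) (by simp [hgo])
    | false => rfl
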